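-- pv_equiv track=rewrite | github.com/NlightN22/xray-p2p | tests/host/win/test_tunnel_redirect.py | _expected_tag
-- ===== SOURCE A (Python) =====
-- def _expected_tag(host: str) -> str:
--     cleaned = host.strip().lower()
--     result = []
--     last_dash = False
--     for char in cleaned:
--         if char.isalnum():
--             result.append(char)
--             last_dash = False
--             continue
--         if char == "-":
--             result.append(char)
--             last_dash = False
--             continue
--         if not last_dash:
--             result.append("-")
--             last_dash = True
--     sanitized = "".join(result).strip("-")
--     if not sanitized:
--         sanitized = "endpoint"
--     return f"proxy-{sanitized}"
-- ===== SOURCE B (Python) =====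
-- from itertools import groupby
--
--
-- def _expected_tag(host: str) -> str:
--     cleaned = host.strip().lower()
--     parts = []
--     for kept, group in groupby(cleaned, key=lambda c: c.isalnum() or c == "-"):
--         parts.append("".join(group) if kept else "-")
--     sanitized = "".join(parts).strip("-")
--     return f"proxy-{sanitized or 'endpoint'}"
-- ===== Notes on version B (the rewrite author's own statement) =====
-- stated objective: idiomatic
-- what changed: Replaced the per-character last_dash state flag with itertools.groupby run-grouping: maximal runs of kept characters are emitted verbatim and each separator run collapses to a single dash.
import Mathlib
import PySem

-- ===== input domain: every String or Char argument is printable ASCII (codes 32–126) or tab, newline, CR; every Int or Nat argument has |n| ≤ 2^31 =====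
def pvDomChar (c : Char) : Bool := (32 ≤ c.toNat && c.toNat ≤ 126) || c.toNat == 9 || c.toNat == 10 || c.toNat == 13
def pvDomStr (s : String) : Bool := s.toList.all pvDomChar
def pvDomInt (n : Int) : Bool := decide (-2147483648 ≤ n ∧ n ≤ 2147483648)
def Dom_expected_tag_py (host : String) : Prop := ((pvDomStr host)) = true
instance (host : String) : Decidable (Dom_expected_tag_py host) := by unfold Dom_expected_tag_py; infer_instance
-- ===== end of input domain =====

-- B replaces A's last_dash state flag with groupby-style run-grouping (idiomatic decomposition, same cost).

-- ===== PORT A =====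
-- the for-loop's body: state (result, last_dash)
def tagStepA (acc : List Char × Bool) (c : Char) : List Char × Bool :=
  if PySem.Chars.isalnum c then (acc.1 ++ [c], false)
  else if c = '-' then (acc.1 ++ [c], false)
  else if !acc.2 then (acc.1 ++ ['-'], true)
  else acc

def expected_tag_py (host : String) : String :=
  let cleaned := PySem.Str.lower (PySem.Str.strip host)
  let r := cleaned.toList.foldl tagStepA ([], false)
  let sanitized := PySem.Str.stripChars (String.ofList r.1) "-"
  let sanitized := if sanitized = "" then "endpoint" else sanitized
  "proxy-" ++ sanitized

-- ===== PORT B =====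
-- the groupby key: kept characters
def keepB (c : Char) : Bool := PySem.Chars.isalnum c || c == '-'

-- itertools.groupby over the key: maximal runs with their (shared) key value
def runsB (l : List Char) : List (Bool × List Char) :=
  match l with
  | [] => []
  | c :: cs =>
    (keepB c, c :: cs.takeWhile (fun d => keepB d == keepB c)) ::
      runsB (cs.dropWhile (fun d => keepB d == keepB c))
termination_by l.length
decreasing_by
  simpa using Nat.lt_succ_of_le (List.length_dropWhile_le _ _)

def expected_tag_py_alt (host : String) : String :=
  let cleaned := PySem.Str.lower (PySem.Str.strip host)
  let parts := (runsB cleaned.toList).flatMap (fun kg => if kg.1 then kg.2 else ['-'])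
  let sanitized := PySem.Str.stripChars (String.ofList parts) "-"
  "proxy-" ++ (if sanitized = "" then "endpoint" else sanitized)

-- ===== PRECONDITION & SPEC =====
def Spec_expected_tag_py (host : String) (out : String) : Prop := out = expected_tag_py_alt host
instance (host : String) (out : String) : Decidable (Spec_expected_tag_py host out) := by unfold Spec_expected_tag_py; infer_instance

-- ===== CLAIM (what is proved, stated in full; the proofs are below) =====
def Claim_equal_expected_tag_py : Prop := ∀ (host : String), Dom_expected_tag_py host → Spec_expected_tag_py host (expected_tag_py host)

-- ===== LEMMAS AND PROOFS =====

-- A's loop rewritten as front recursion (proof-side only)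
def coreA : List Char → Bool → List Char
  | [], _ => []
  | c :: cs, ld =>
    if keepB c then c :: coreA cs false
    else if !ld then '-' :: coreA cs true
    else coreA cs ld

theorem foldl_tagStepA (l : List Char) : ∀ acc ld,
    (l.foldl tagStepA (acc, ld)).1 = acc ++ coreA l ld := by
  induction l with
  | nil => simp [coreA]
  | cons c cs ih =>
    intro acc ld
    by_cases h1 : PySem.Chars.isalnum c
    · simp [tagStepA, coreA, keepB, h1, ih]
    · by_cases h2 : c = '-'
      · simp [tagStepA, coreA, keepB, h2, ih]
      · by_cases h3 : ld
        · simp [tagStepA, coreA, keepB, h1, h2, h3, ih]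
        · simp [tagStepA, coreA, keepB, h1, h2, h3, ih]

def flatB (rs : List (Bool × List Char)) : List Char :=
  rs.flatMap (fun kg => if kg.1 then kg.2 else ['-'])

theorem coreA_keep_run (cs : List Char) :
    coreA cs false = cs.takeWhile keepB ++ coreA (cs.dropWhile keepB) false := by
  induction cs with
  | nil => simp
  | cons c cs ih =>
    by_cases h : keepB c
    · simp [coreA, h, ih]
    · simp [h]

theorem coreA_true_drop (cs : List Char) :
    coreA cs true = coreA (cs.dropWhile (fun d => !keepB d)) false := by
  induction cs with
  | nil => simp [coreA]
  | cons c cs ih =>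
    by_cases h : keepB c
    · simp [coreA, h]
    · simpa [coreA, h] using ih

theorem coreA_eq_flat_runsB : ∀ n l, l.length ≤ n → coreA l false = flatB (runsB l)
  | _, [], _ => by simp [coreA, runsB, flatB]
  | n + 1, c :: cs, h => by
    rw [runsB]
    by_cases hk : keepB c
    · simp only [coreA, hk, if_pos, flatB, List.flatMap_cons]
      rw [coreA_keep_run]
      have : (cs.dropWhile keepB).length ≤ n :=
        le_trans (List.length_dropWhile_le _ _) (Nat.le_of_succ_le_succ h)
      rw [coreA_eq_flat_runsB n _ this]
      simp [flatB]
    · simp only [coreA, hk, flatB, List.flatMap_cons]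
      rw [coreA_true_drop]
      have : (cs.dropWhile (fun d => !keepB d)).length ≤ n :=
        le_trans (List.length_dropWhile_le _ _) (Nat.le_of_succ_le_succ h)
      rw [coreA_eq_flat_runsB n _ this]
      simp [flatB]

-- ===== VERDICT (by name: the statement is the Claim_ definition above) =====
theorem expected_tag_py_spec : Claim_equal_expected_tag_py := by
  intro host _
  unfold Spec_expected_tag_py expected_tag_py expected_tag_py_alt
  have h1 := foldl_tagStepA (PySem.Str.lower (PySem.Str.strip host)).toList [] false
  have h2 := coreA_eq_flat_runsB (PySem.Str.lower (PySem.Str.strip host)).toList.length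
      (PySem.Str.lower (PySem.Str.strip host)).toList le_rfl
  simp only [h1, List.nil_append, h2, flatB]
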